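-- pv_equiv track=rewrite | github.com/chrisdev2018/getting_start_git | fonctions.py | nb_lettres_trouvees
-- ===== SOURCE A (Python) =====
-- def nb_lettres_trouvees(mot):
--     i = 0
--     nb_lettre_trouve = 0
--     while i < len(mot):
--         if mot[i] != '*':
--             nb_lettre_trouve += 1
--             i += 1
--         else:
--             i += 1
--
--     return nb_lettre_trouve
-- ===== SOURCE B (Python) =====
-- def nb_lettres_trouvees(mot):
--     return len(mot) - mot.count('*')
-- ===== Notes on version B (the rewrite author's own statement) =====
-- stated objective: simpler
-- what changed: Replaces the index-based while loop that increments a counter per non-asterisk character with a one-line complement computation: total string length minus the number of asterisk characters obtained by a single count call.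
import Mathlib
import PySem

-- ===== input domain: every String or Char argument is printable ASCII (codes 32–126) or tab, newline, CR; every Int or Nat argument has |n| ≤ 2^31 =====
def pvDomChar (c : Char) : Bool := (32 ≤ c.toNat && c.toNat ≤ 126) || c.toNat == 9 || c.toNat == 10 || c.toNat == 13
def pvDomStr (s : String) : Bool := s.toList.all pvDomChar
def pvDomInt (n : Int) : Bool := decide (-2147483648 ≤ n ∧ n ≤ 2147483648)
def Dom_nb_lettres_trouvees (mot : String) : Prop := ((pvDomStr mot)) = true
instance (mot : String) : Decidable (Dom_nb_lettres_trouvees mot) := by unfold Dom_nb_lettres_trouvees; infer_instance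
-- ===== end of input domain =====

-- B replaces A's per-character counting loop with length-minus-count('*'); objective: simpler.

-- ===== PORT A =====
-- while i < len(mot): if mot[i] != '*': nb += 1; i += 1 else: i += 1  — an index loop over 0..len-1
def nb_lettres_trouvees (mot : String) : Int :=
  (PySem.List.pyRange 0 (PySem.List.len mot.toList)).foldl
    (fun acc i => if PySem.List.pyGetD mot.toList i ' ' ≠ '*' then acc + 1 else acc) 0

-- ===== PORT B =====
-- return len(mot) - mot.count('*')
def nb_lettres_trouvees_alt (mot : String) : Int :=
  (PySem.Str.len mot : Int) - (PySem.Str.count mot "*" : Int)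

-- ===== PRECONDITION & SPEC =====
def Spec_nb_lettres_trouvees (mot : String) (out : Int) : Prop := out = nb_lettres_trouvees_alt mot
instance (mot : String) (out : Int) : Decidable (Spec_nb_lettres_trouvees mot out) := by unfold Spec_nb_lettres_trouvees; infer_instance

-- ===== CLAIM (what is proved, stated in full; the proofs are below) =====
def Claim_equal_nb_lettres_trouvees : Prop := ∀ (mot : String), Dom_nb_lettres_trouvees mot → Spec_nb_lettres_trouvees mot (nb_lettres_trouvees mot)

-- ===== LEMMAS AND PROOFS =====

theorem go_zero (sub : List Char) (l : List Char) (acc : Nat) :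
    PySem.Chars.count.go sub 0 l acc = acc := by
  cases l <;> rfl

theorem go_succ_nil (sub : List Char) (n : Nat) (acc : Nat) :
    PySem.Chars.count.go sub (n + 1) [] acc = acc := rfl

theorem go_succ_cons (sub : List Char) (n : Nat) (x : Char) (t : List Char) (acc : Nat) :
    PySem.Chars.count.go sub (n + 1) (x :: t) acc =
      if sub.isPrefixOf (x :: t) then
        PySem.Chars.count.go sub n (List.drop sub.length (x :: t)) (acc + 1)
      else PySem.Chars.count.go sub n t acc := rfl

-- Chars.count.go with a single-character pattern counts occurrences of that character.
theorem count_go_single (c : Char) : ∀ (fuel : Nat) (l : List Char) (acc : Nat),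
    l.length ≤ fuel → PySem.Chars.count.go [c] fuel l acc = acc + l.count c := by
  intro fuel
  induction fuel with
  | zero =>
    intro l acc h
    have : l = [] := List.eq_nil_of_length_eq_zero (Nat.le_zero.mp h)
    subst this
    simp [go_zero]
  | succ n ih =>
    intro l acc h
    cases l with
    | nil => simp [go_succ_nil]
    | cons x t =>
      rw [go_succ_cons]
      have ht : t.length ≤ n := by simpa using h
      by_cases hx : x = c
      · have hpre : List.isPrefixOf [c] (x :: t) = true := by
          simp [List.isPrefixOf, hx]
        rw [if_pos hpre]
        rw [show (List.drop (List.length [c]) (x :: t)) = t by simp]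
        rw [ih t (acc + 1) ht]
        simp [hx]
        omega
      · have hpre : List.isPrefixOf [c] (x :: t) = false := by
          simp [List.isPrefixOf]
          exact fun hh => hx hh.symm
        rw [if_neg (by simp [hpre])]
        rw [ih t acc ht]
        simp [hx]

theorem str_count_single (s : String) : PySem.Str.count s "*" = s.toList.count '*' := by
  rw [PySem.Str.count_eq]
  rw [show ("*" : String).toList = ['*'] from rfl]
  unfold PySem.Chars.count
  rw [if_neg (by simp)]
  simpa using count_go_single '*' s.toList.length s.toList 0 le_rfl

theorem len_sub_count (l : List Char) :
    (l.length : Int) - l.count '*' = l.countP (fun c => decide (c ≠ '*')) := by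
  induction l with
  | nil => simp
  | cons x t ih =>
    simp only [List.count_cons, List.countP_cons, List.length_cons]
    by_cases hx : x = '*'
    · rw [if_pos (by simp [hx]), if_neg (by simp [hx])]
      push_cast
      omega
    · rw [if_neg (by simp [hx]), if_pos (by simp [hx])]
      push_cast
      omega

-- ===== VERDICT (by name: the statement is the Claim_ definition above) =====
theorem nb_lettres_trouvees_spec : Claim_equal_nb_lettres_trouvees := by
  intro mot _
  unfold Spec_nb_lettres_trouvees nb_lettres_trouvees nb_lettres_trouvees_alt
  rw [PySem.List.foldl_ite_add_one]
  rw [str_count_single]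
  have hcount : (PySem.List.pyRange 0 (PySem.List.len mot.toList)).countP
      (fun i => decide (PySem.List.pyGetD mot.toList i ' ' ≠ '*'))
      = mot.toList.countP (fun c => decide (c ≠ '*')) := by
    conv_rhs => rw [← PySem.List.map_pyGetD_pyRange_zero mot.toList ' ']
    rw [List.countP_map]
    rfl
  rw [hcount]
  have hlen : (PySem.Str.len mot : Int) = (mot.toList.length : Int) := by
    simp [PySem.Str.len]
  rw [hlen, len_sub_count]
  ring
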